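-- pv_equiv track=rewrite | github.com/BioSTEAMDevelopmentGroup/biosteam | biosteam/process_tools/utils.py | ID_number
-- ===== SOURCE A (Python) =====
-- def ID_number(ID):
--     """
--     Return number if ID follows naming convention "{letter}{number}" where
--     the area is an integer. Returns None if no area is found
--
--     """
--     for i, letter in enumerate(ID):
--         if letter.isdigit(): break
--     else:
--         return ''
--     for j, letter in enumerate(ID[i:], start=i+1):
--         if not letter.isdigit():
--             j -= 1
--             break
--     return ID[i:j]
-- ===== SOURCE B (Python) =====
-- def ID_number(ID):
--     """
--     Return number if ID follows naming convention "{letter}{number}" where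
--     the area is an integer. Returns '' if no digit is found.
--     """
--     digits = ''
--     started = False
--     for c in ID:
--         if c.isdigit():
--             digits += c
--             started = True
--         elif started:
--             break
--     return digits
-- ===== Notes on version B (the rewrite author's own statement) =====
-- stated objective: simpler
-- what changed: Single forward pass with an accumulator string and a seen-a-digit flag, instead of two separate index-hunting enumerate loops (with for-else and j-adjustment) followed by slicing.
import Mathlib
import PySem

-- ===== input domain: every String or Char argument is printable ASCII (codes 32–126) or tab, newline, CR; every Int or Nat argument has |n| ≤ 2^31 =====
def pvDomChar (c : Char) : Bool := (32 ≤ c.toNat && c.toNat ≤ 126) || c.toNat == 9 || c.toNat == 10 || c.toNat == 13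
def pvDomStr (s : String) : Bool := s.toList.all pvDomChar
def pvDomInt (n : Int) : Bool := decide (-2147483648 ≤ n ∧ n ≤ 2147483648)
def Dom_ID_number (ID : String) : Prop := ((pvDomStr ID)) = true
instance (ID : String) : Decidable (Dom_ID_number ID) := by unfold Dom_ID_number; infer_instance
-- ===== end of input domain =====

-- B replaces A's two enumerate/index loops and slicing by one forward pass with an accumulator and a seen-a-digit flag (simpler; same O(n) cost).

-- ===== PORT A =====
-- first 'for i, letter in enumerate(ID): if letter.isdigit(): break / else: return '''
def pvAFind : List (Int × Char) → Option Int
  | [] => none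
  | (i, c) :: rest => if PySem.Chars.isdigit c then some i else pvAFind rest

-- second 'for j, letter in enumerate(ID[i:], start=i+1): if not letter.isdigit(): j -= 1; break'
-- (the j parameter is the last value bound to j; unreachable default when the slice is empty)
def pvALoop2 : List (Int × Char) → Int → Int
  | [], j => j
  | (k, c) :: rest, _ => if ¬ PySem.Chars.isdigit c then k - 1 else pvALoop2 rest k

def ID_number (ID : String) : String :=
  let s := ID.toList
  match pvAFind (PySem.List.enumerate s) with
  | none => ""
  | some i =>
    let j := pvALoop2 (PySem.List.enumerate (PySem.List.slice s (some i) none) (i + 1)) i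
    String.ofList (PySem.List.slice s (some i) (some j))

-- ===== PORT B =====
-- one pass: accumulate digits once the first digit is seen, stop at the first non-digit after that
def pvBLoop : List Char → List Char → Bool → List Char
  | [], acc, _ => acc
  | c :: rest, acc, started =>
    if PySem.Chars.isdigit c then pvBLoop rest (acc ++ [c]) true
    else if started then acc else pvBLoop rest acc started

def ID_number_alt (ID : String) : String :=
  String.ofList (pvBLoop ID.toList [] false)

-- ===== PRECONDITION & SPEC =====
def Spec_ID_number (ID : String) (out : String) : Prop := out = ID_number_alt ID
instance (ID : String) (out : String) : Decidable (Spec_ID_number ID out) := by unfold Spec_ID_number; infer_instance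

-- ===== CLAIM (what is proved, stated in full; the proofs are below) =====
def Claim_equal_ID_number : Prop := ∀ (ID : String), Dom_ID_number ID → Spec_ID_number ID (ID_number ID)

-- ===== LEMMAS AND PROOFS =====

theorem pvBLoop_started (s acc : List Char) :
    pvBLoop s acc true = acc ++ s.takeWhile PySem.Chars.isdigit := by
  induction s generalizing acc with
  | nil => simp [pvBLoop]
  | cons c rest ih =>
    by_cases h : PySem.Chars.isdigit c <;> simp [pvBLoop, h, ih]

theorem pvBLoop_eq (s : List Char) :
    pvBLoop s [] false =
      (s.dropWhile (fun c => ¬ PySem.Chars.isdigit c)).takeWhile PySem.Chars.isdigit := by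
  induction s with
  | nil => simp [pvBLoop]
  | cons c rest ih =>
    by_cases h : PySem.Chars.isdigit c
    · simp [pvBLoop, h, pvBLoop_started]
    · simp [pvBLoop, h, ih]

theorem pvAFind_eq (s : List Char) (k : Int) :
    pvAFind (PySem.List.enumerate s k) =
      if s.any PySem.Chars.isdigit then
        some (k + (s.findIdx PySem.Chars.isdigit : Int))
      else none := by
  induction s generalizing k with
  | nil => simp [pvAFind, PySem.List.enumerate_nil]
  | cons c rest ih =>
    by_cases h : PySem.Chars.isdigit c
    · simp [PySem.List.enumerate_cons, pvAFind, h, List.findIdx_cons]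
    · simp only [PySem.List.enumerate_cons, pvAFind, h, ih, List.any_cons,
        Bool.false_or, List.findIdx_cons, Bool.cond_eq_ite]
      by_cases h2 : rest.any PySem.Chars.isdigit
      · simp only [h2, if_true]
        push_cast
        ring_nf
      · simp [h2]

theorem pvALoop2_eq (t : List Char) (m : Int) :
    pvALoop2 (PySem.List.enumerate t (m + 1)) m =
      m + ((t.takeWhile PySem.Chars.isdigit).length : Int) := by
  induction t generalizing m with
  | nil => simp [pvALoop2, PySem.List.enumerate_nil]
  | cons c rest ih =>
    by_cases h : PySem.Chars.isdigit c
    · have hrec := ih (m + 1)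
      simp only [PySem.List.enumerate_cons, pvALoop2, h, not_true, if_false, hrec,
        List.takeWhile_cons, if_true, List.length_cons]
      push_cast
      ring
    · simp [PySem.List.enumerate_cons, pvALoop2, h]

theorem take_takeWhile_len (p : Char → Bool) (t : List Char) :
    t.take (t.takeWhile p).length = t.takeWhile p := by
  induction t with
  | nil => simp
  | cons c rest ih =>
    by_cases h : p c <;> simp [h, ih]

theorem drop_findIdx_eq_dropWhile (p : Char → Bool) (s : List Char) :
    s.drop (s.findIdx p) = s.dropWhile (fun c => ¬ p c) := by
  induction s with
  | nil => simp
  | cons c rest ih =>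
    by_cases h : p c <;> simp [List.findIdx_cons, h, ih]

-- ===== VERDICT (by name: the statement is the Claim_ definition above) =====
theorem ID_number_spec : Claim_equal_ID_number := by
  intro ID _
  unfold Spec_ID_number ID_number ID_number_alt
  simp only [pvBLoop_eq, pvAFind_eq]
  by_cases hd : ID.toList.any PySem.Chars.isdigit
  · simp only [hd, if_true]
    set s := ID.toList with hs
    set i : Nat := s.findIdx PySem.Chars.isdigit with hi
    have hslice : PySem.List.slice s (some ((0:Int) + (i:Int))) none = s.drop i := by
      rw [PySem.List.slice_from _ (by positivity)]
      norm_num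
    rw [hslice, pvALoop2_eq (s.drop i) ((0:Int) + (i:Int))]
    set L : Nat := ((s.drop i).takeWhile PySem.Chars.isdigit).length with hL
    have harith : (0:Int) + (i:Int) + (L:Int) = ((i + L : Nat) : Int) := by push_cast; ring
    rw [harith, PySem.List.slice_toNat s (by positivity) (by positivity)]
    simp only [Int.toNat_natCast, zero_add]
    have h2 : i + L - i = L := by omega
    rw [h2, hL, take_takeWhile_len, drop_findIdx_eq_dropWhile]
  · simp only [hd]
    have hnil : ID.toList.dropWhile (fun c => ¬ PySem.Chars.isdigit c) = [] := by
      rw [List.dropWhile_eq_nil_iff]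
      intro c hc
      rw [List.any_eq_true] at hd
      push Not at hd
      simpa using hd c hc
    rw [hnil]
    simp
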